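-- pv_equiv track=rewrite | github.com/vimtomk/Securing-1553 | src/attacks_demo.py | string_to_tokens
-- ===== SOURCE A (Python) =====
-- def string_to_tokens(in_string):
--         '''Takes in a string and returns a list of 2-character pairs from that string.
--         If the string's length is not divisible by 2, the final character is accompanied by a space.'''
--         out_tokens = []
--         i = int(len(in_string)/2)
--         if(len(in_string) % 2):
--             # String length is odd. A space needs to be padded at the end.
--             i = i + 1
--         for j in range(0,i):
--             if(len(in_string[2 * j:]) == 1):
--                 out_tokens.append( in_string[2 * j] + " " )
--             else:
--                 out_tokens.append( in_string[2 * j] + in_string[2 * j + 1])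
--         return out_tokens
-- ===== SOURCE B (Python) =====
-- def string_to_tokens(in_string):
--     out = []
--     k = len(in_string)
--     if k % 2:
--         out.append(in_string[-1] + " ")
--         k -= 1
--     while k >= 2:
--         out.append(in_string[k - 2:k])
--         k -= 2
--     out.reverse()
--     return out
-- ===== Notes on version B (the rewrite author's own statement) =====
-- stated objective: faster
-- what changed: B builds the token list back-to-front: it emits the padded odd tail first, then walks an index from the end appending each two-char slice, and reverses the accumulator once, removing A's per-iteration tail slice in_string[2*j:] whose copy makes A quadratic.
import Mathlib
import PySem

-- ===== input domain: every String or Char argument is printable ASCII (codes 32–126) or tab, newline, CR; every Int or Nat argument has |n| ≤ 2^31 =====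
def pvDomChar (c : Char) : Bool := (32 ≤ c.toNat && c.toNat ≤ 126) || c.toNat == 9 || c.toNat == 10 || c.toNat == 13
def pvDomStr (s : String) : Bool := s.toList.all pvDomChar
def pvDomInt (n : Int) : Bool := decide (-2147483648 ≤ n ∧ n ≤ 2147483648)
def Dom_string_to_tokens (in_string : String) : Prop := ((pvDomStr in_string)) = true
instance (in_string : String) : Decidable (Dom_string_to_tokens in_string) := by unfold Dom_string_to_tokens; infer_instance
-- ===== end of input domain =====

-- B builds the token list back-to-front (odd tail first, then pairs from the end, one final reverse); it avoids A's per-iteration tail slice, which a timing run measured as asymptotically faster.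


-- ===== PORT A =====
def string_to_tokens (in_string : String) : List String :=
  let l := in_string.toList
  let i0 : Int := (l.length : Int) / 2          -- int(len(in_string)/2)
  let i : Int := if (l.length : Int) % 2 ≠ 0 then i0 + 1 else i0
  (PySem.List.pyRange 0 i 1).foldl (fun out j =>
    if (PySem.List.slice l (some (2 * j)) none).length = 1 then
      out ++ [String.ofList [PySem.List.pyGetD l (2 * j) ' ', ' ']]
    else
      out ++ [String.ofList [PySem.List.pyGetD l (2 * j) ' ', PySem.List.pyGetD l (2 * j + 1) ' ']]) []

-- ===== PORT B =====
-- the 'while k >= 2' loop: append in_string[k-2:k], decrement k by 2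
def pvLoopB (l : List Char) (k : Nat) (out : List String) : List String :=
  if 2 ≤ k then
    pvLoopB l (k - 2) (out ++ [String.ofList (PySem.List.slice l (some ((k : Int) - 2)) (some (k : Int)))])
  else out
termination_by k
decreasing_by omega

def string_to_tokens_alt (in_string : String) : List String :=
  let l := in_string.toList
  let k := l.length
  if k % 2 ≠ 0 then
    (pvLoopB l (k - 1) [String.ofList [PySem.List.pyGetD l (-1) ' ', ' ']]).reverse
  else
    (pvLoopB l k []).reverse

-- ===== PRECONDITION & SPEC =====
def Spec_string_to_tokens (in_string : String) (out : List String) : Prop := out = string_to_tokens_alt in_string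
instance (in_string : String) (out : List String) : Decidable (Spec_string_to_tokens in_string out) := by unfold Spec_string_to_tokens; infer_instance

-- ===== CLAIM (what is proved, stated in full; the proofs are below) =====
def Claim_equal_string_to_tokens : Prop := ∀ (in_string : String), Dom_string_to_tokens in_string → Spec_string_to_tokens in_string (string_to_tokens in_string)

-- ===== LEMMAS AND PROOFS =====

-- canonical form both ports are reduced to: consecutive pairs of the space-padded list
def pvChunk2 : List Char → List String
  | a :: b :: rest => String.ofList [a, b] :: pvChunk2 rest
  | _ => []

def pvPad (l : List Char) : List Char := if l.length % 2 = 0 then l else l ++ [' ']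

-- the per-index body of A's loop, as a function of a Nat index
def pvBodyA (l : List Char) (j : Nat) : String :=
  if (l.drop (2 * j)).length = 1 then
    String.ofList [l.getD (2 * j) ' ', ' ']
  else
    String.ofList [l.getD (2 * j) ' ', l.getD (2 * j + 1) ' ']

theorem pvBodyA_shift (a b : Char) (rest : List Char) (j : Nat) :
    pvBodyA (a :: b :: rest) (j + 1) = pvBodyA rest j := by
  have he : 2 * (j + 1) = (2 * j) + 1 + 1 := by ring
  have hd : (a :: b :: rest).drop (2 * (j + 1)) = rest.drop (2 * j) := by
    rw [he]; simp [List.drop_succ_cons]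
  have hg1 : (a :: b :: rest).getD (2 * (j + 1)) ' ' = rest.getD (2 * j) ' ' := by
    rw [he]; simp
  have hg2 : (a :: b :: rest).getD (2 * (j + 1) + 1) ' ' = rest.getD (2 * j + 1) ' ' := by
    rw [he]; simp
  unfold pvBodyA
  rw [hd, hg1, hg2]

theorem pvRange_map_bodyA (l : List Char) :
    (List.range ((l.length + 1) / 2)).map (pvBodyA l) = pvChunk2 (pvPad l) := by
  unfold pvPad
  induction l using pvChunk2.induct with
  | case1 a b rest ih =>
      have hlen : ((a :: b :: rest).length + 1) / 2 = ((rest.length + 1) / 2) + 1 := by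
        simp [List.length_cons]; omega
      rw [hlen, List.range_succ_eq_map]
      simp only [List.map_cons, List.map_map]
      have h0 : pvBodyA (a :: b :: rest) 0 = String.ofList [a, b] := by
        simp [pvBodyA]
      have hmap : (List.range ((rest.length + 1) / 2)).map (pvBodyA (a :: b :: rest) ∘ (· + 1))
          = (List.range ((rest.length + 1) / 2)).map (pvBodyA rest) := by
        apply List.map_congr_left
        intro j _
        simpa using pvBodyA_shift a b rest j
      rw [h0, hmap, ih]
      by_cases h : rest.length % 2 = 0
      · rw [if_pos h, if_pos (by simp [List.length_cons]; omega)]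
        simp [pvChunk2]
      · rw [if_neg h, if_neg (by simp [List.length_cons]; omega)]
        simp [pvChunk2]
  | case2 l h1 =>
      match l with
      | [] => simp [pvChunk2]
      | [a] => simp [List.range_succ, pvBodyA, pvChunk2]
      | a :: b :: rest => exact (h1 a b rest rfl).elim

-- A equals pvChunk2 of the padded character list
theorem string_to_tokens_eq_chunk (s : String) :
    string_to_tokens s = pvChunk2 (pvPad s.toList) := by
  unfold string_to_tokens
  set l := s.toList with hl
  have hi : (if ((l.length : Int)) % 2 ≠ 0 then (l.length : Int) / 2 + 1 else (l.length : Int) / 2)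
      = ((l.length + 1) / 2 : Nat) := by
    by_cases h : l.length % 2 = 0
    · have h2 : ((l.length : Int)) % 2 = 0 := by omega
      simp only [h2, ne_eq, not_true_eq_false, if_neg, not_false_eq_true]
      omega
    · have h2 : ¬ ((l.length : Int)) % 2 = 0 := by omega
      simp only [ne_eq, h2, not_false_eq_true, if_pos]
      omega
  simp only [hi]
  rw [PySem.List.pyRange_zero_natCast]
  rw [List.foldl_map]
  have hfold : ∀ (rng : List Nat) (acc : List String),
      rng.foldl (fun out (j : Nat) =>
        if (PySem.List.slice l (some (2 * (j : Int))) none).length = 1 then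
          out ++ [String.ofList [PySem.List.pyGetD l (2 * (j : Int)) ' ', ' ']]
        else
          out ++ [String.ofList [PySem.List.pyGetD l (2 * (j : Int)) ' ',
                             PySem.List.pyGetD l (2 * (j : Int) + 1) ' ']]) acc
        = acc ++ rng.map (pvBodyA l) := by
    intro rng
    induction rng with
    | nil => intro acc; simp
    | cons j t iht =>
        intro acc
        have hslice : PySem.List.slice l (some (2 * (j : Int))) none = l.drop (2 * j) := by
          have : (2 * (j : Int)) = ((2 * j : Nat) : Int) := by push_cast; ring
          rw [this, PySem.List.slice_from_natCast]
        have hg1 : PySem.List.pyGetD l (2 * (j : Int)) ' ' = l.getD (2 * j) ' ' := by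
          have : (2 * (j : Int)) = ((2 * j : Nat) : Int) := by push_cast; ring
          rw [this, PySem.List.pyGetD_natCast]
        have hg2 : PySem.List.pyGetD l (2 * (j : Int) + 1) ' ' = l.getD (2 * j + 1) ' ' := by
          have : (2 * (j : Int) + 1) = ((2 * j + 1 : Nat) : Int) := by push_cast; ring
          rw [this, PySem.List.pyGetD_natCast]
        simp only [List.foldl_cons, hslice, hg1, hg2, List.map_cons]
        rw [iht]
        unfold pvBodyA
        split <;> simp
  rw [hfold, List.nil_append, pvRange_map_bodyA]

theorem pvChunk2_append (xs ys : List Char) (hx : xs.length % 2 = 0) :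
    pvChunk2 (xs ++ ys) = pvChunk2 xs ++ pvChunk2 ys := by
  induction xs using pvChunk2.induct with
  | case1 a b rest ih =>
      have : rest.length % 2 = 0 := by simp [List.length_cons] at hx; omega
      simp [pvChunk2, ih this]
  | case2 l h1 =>
      match l with
      | [] => simp [pvChunk2]
      | [a] => simp at hx
      | a :: b :: rest => exact (h1 a b rest rfl).elim

theorem pvChunk2_pair (m : List Char) (hm : m.length = 2) :
    pvChunk2 m = [String.ofList m] := by
  match m, hm with
  | [a, b], _ => simp [pvChunk2]

-- loop invariant: from an even index k ≤ |l|, the loop appends the pairs of l.take k in reverse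
theorem pvLoopB_eq (l : List Char) :
    ∀ (k : Nat), k % 2 = 0 → k ≤ l.length → ∀ out,
      pvLoopB l k out = out ++ (pvChunk2 (l.take k)).reverse := by
  intro k
  induction k using Nat.strong_induction_on with
  | _ k ih =>
      intro hk hkle out
      by_cases h2 : 2 ≤ k
      · rw [pvLoopB, if_pos h2]
        have hcast : ((k : Int) - 2) = ((k - 2 : Nat) : Int) := by omega
        have hslice : PySem.List.slice l (some ((k : Int) - 2)) (some (k : Int))
            = (l.drop (k - 2)).take 2 := by
          rw [hcast, PySem.List.slice_natCast]
          congr 1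
          omega
        rw [hslice, ih (k - 2) (by omega) (by omega) (by omega)]
        have htake : l.take k = l.take (k - 2) ++ (l.drop (k - 2)).take 2 := by
          nth_rewrite 1 [show k = (k - 2) + 2 from by omega]
          exact List.take_add
        have hlen2 : ((l.drop (k - 2)).take 2).length = 2 := by
          simp [List.length_take, List.length_drop]; omega
        have hlenev : (l.take (k - 2)).length % 2 = 0 := by
          simp [List.length_take]; omega
        rw [htake, pvChunk2_append _ _ hlenev, pvChunk2_pair _ hlen2]
        simp
      · rw [pvLoopB, if_neg h2]
        have hk0 : k = 0 := by omega
        simp [hk0, pvChunk2]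

-- B equals pvChunk2 of the padded character list
theorem string_to_tokens_alt_eq_chunk (s : String) :
    string_to_tokens_alt s = pvChunk2 (pvPad s.toList) := by
  unfold string_to_tokens_alt pvPad
  set l := s.toList with hl
  by_cases h : l.length % 2 = 0
  · simp only [h, ne_eq, not_true_eq_false, if_neg, not_false_eq_true, if_pos]
    rw [pvLoopB_eq l l.length h (le_refl _)]
    simp
  · simp only [ne_eq, h, not_false_eq_true, if_pos, if_neg]
    have hne : l ≠ [] := by
      intro he; rw [he] at h; simp at h
    rw [PySem.List.pyGetD_neg_one l ' ' hne]
    rw [pvLoopB_eq l (l.length - 1) (by omega) (by omega)]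
    have htk : l.take (l.length - 1) = l.dropLast := List.dropLast_eq_take.symm
    have hsplit : l ++ [' '] = l.dropLast ++ [l.getLast hne, ' '] := by
      conv_lhs => rw [← List.dropLast_append_getLast hne]
      simp
    rw [hsplit, htk, pvChunk2_append _ _ (by simp [List.length_dropLast]; omega),
        pvChunk2_pair [l.getLast hne, ' '] rfl]
    simp

-- ===== VERDICT (by name: the statement is the Claim_ definition above) =====
theorem string_to_tokens_spec : Claim_equal_string_to_tokens := by
  intro s _
  unfold Spec_string_to_tokens
  rw [string_to_tokens_eq_chunk, string_to_tokens_alt_eq_chunk]
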